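-- pv_equiv track=rewrite | github.com/anden3/Python | dailyprogrammer/#220 - Mangling Sentences.py | return_alphabetized
-- ===== SOURCE A (Python) =====
-- def return_alphabetized(word):
--     word_list = list(word)
--
--     indexes = []
--     chars = []
--     case = []
--
--     for i, c in enumerate(word_list):
--         if c.isalpha():
--             indexes.append(i)
--             chars.append(c.lower())
--             case.append(c.isupper())
--
--     chars = sorted(chars)
--
--     for i, index in enumerate(indexes):
--         if case[i]:
--             word_list[index] = chars[i].upper()
--         else:
--             word_list[index] = chars[i]
--
--     return ''.join(word_list)
-- ===== SOURCE B (Python) =====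
-- def return_alphabetized(word):
--     counts = [0] * 26
--     for c in word:
--         if c.isalpha():
--             counts[ord(c.lower()) - 97] += 1
--
--     letters = []
--     for k in range(26):
--         letters.extend(chr(97 + k) * counts[k])
--
--     it = iter(letters)
--     out = []
--     for c in word:
--         if c.isalpha():
--             l = next(it)
--             out.append(l.upper() if c.isupper() else l)
--         else:
--             out.append(c)
--
--     return ''.join(out)
-- ===== Notes on version B (the rewrite author's own statement) =====
-- stated objective: faster
-- what changed: Replaces the comparison sort plus index-writeback with a 26-bucket counting sort whose output is consumed by a single forward pass over the word.
import Mathlib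
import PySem

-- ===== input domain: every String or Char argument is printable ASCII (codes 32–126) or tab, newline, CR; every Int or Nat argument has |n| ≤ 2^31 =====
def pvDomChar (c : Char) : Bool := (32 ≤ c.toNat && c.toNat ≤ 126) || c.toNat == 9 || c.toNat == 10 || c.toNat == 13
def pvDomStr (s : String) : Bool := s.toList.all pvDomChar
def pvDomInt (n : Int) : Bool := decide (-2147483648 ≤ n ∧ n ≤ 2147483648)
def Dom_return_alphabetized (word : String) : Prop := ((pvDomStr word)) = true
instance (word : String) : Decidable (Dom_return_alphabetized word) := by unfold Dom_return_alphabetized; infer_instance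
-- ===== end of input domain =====

-- B replaces A's comparison sort + index write-back with a 26-bucket counting sort consumed by one forward pass.

-- ===== PORT A =====
def return_alphabetized (word : String) : String :=
  let wordList := word.toList
  let acc := (PySem.List.enumerate wordList).foldl
    (fun (st : List Int × List Char × List Bool) ic =>
      if PySem.Chars.isalpha ic.2 then
        (st.1 ++ [ic.1], st.2.1 ++ [PySem.Chars.lowerChar ic.2], st.2.2 ++ [PySem.Chars.isupper ic.2])
      else st)
    ([], [], [])
  let indexes := acc.1
  let chars := PySem.List.sorted acc.2.1 (fun c => c) false
  let caseL := acc.2.2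
  let final := (PySem.List.enumerate indexes).foldl
    (fun (wl : List Char) (p : Int × Int) =>
      if PySem.List.pyGetD caseL p.1 false then
        PySem.List.pySetD wl p.2 (PySem.Chars.upperChar (PySem.List.pyGetD chars p.1 ' '))
      else
        PySem.List.pySetD wl p.2 (PySem.List.pyGetD chars p.1 ' '))
    wordList
  String.ofList final

-- ===== PORT B =====
-- 'l = next(it)' is ported as head/tail of the remaining letters; the headD default is never
-- read (letters holds exactly one char per alphabetic char of the word, proved below).
def return_alphabetized_alt (word : String) : String :=
  let ws := word.toList
  let counts := ws.foldl
    (fun (counts : List Int) c =>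
      if PySem.Chars.isalpha c then
        PySem.List.pySetD counts (((PySem.Chars.lowerChar c).toNat : Int) - 97)
          (PySem.List.pyGetD counts (((PySem.Chars.lowerChar c).toNat : Int) - 97) 0 + 1)
      else counts)
    (List.replicate 26 0)
  let letters := (PySem.List.pyRange 0 26 1).foldl
    (fun (acc : List Char) k =>
      acc ++ List.replicate (PySem.List.pyGetD counts k 0).toNat (Char.ofNat (97 + k.toNat)))
    []
  let out := ws.foldl
    (fun (st : List Char × List Char) c =>
      if PySem.Chars.isalpha c then
        (st.1.tail, st.2 ++ [if PySem.Chars.isupper c then PySem.Chars.upperChar (st.1.headD ' ') else st.1.headD ' '])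
      else (st.1, st.2 ++ [c]))
    (letters, [])
  String.ofList out.2

-- ===== PRECONDITION & SPEC =====
def Spec_return_alphabetized (word : String) (out : String) : Prop := out = return_alphabetized_alt word
instance (word : String) (out : String) : Decidable (Spec_return_alphabetized word out) := by unfold Spec_return_alphabetized; infer_instance

-- ===== CLAIM (what is proved, stated in full; the proofs are below) =====
def Claim_equal_return_alphabetized : Prop := ∀ (word : String), Dom_return_alphabetized word → Spec_return_alphabetized word (return_alphabetized word)

-- ===== LEMMAS AND PROOFS =====

-- proof-only helpers
def chrL (k : Nat) : Char := Char.ofNat (97 + k)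
def lowsOf (ws : List Char) : List Char := (ws.filter PySem.Chars.isalpha).map PySem.Chars.lowerChar
def upsOf (ws : List Char) : List Bool := (ws.filter PySem.Chars.isalpha).map PySem.Chars.isupper
def posList : List Char → Int → List Int
  | [], _ => []
  | c :: cs, s => if PySem.Chars.isalpha c then s :: posList cs (s + 1) else posList cs (s + 1)
def mergeF : List Char → Int → (Int → Char) → List Char
  | [], _, _ => []
  | c :: cs, j, f => if PySem.Chars.isalpha c then f j :: mergeF cs (j + 1) f else c :: mergeF cs j f
def caseApp (c l : Char) : Char := if PySem.Chars.isupper c then PySem.Chars.upperChar l else l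
def mergeL : List Char → List Char → List Char
  | [], _ => []
  | c :: cs, L => if PySem.Chars.isalpha c then caseApp c (L.headD 'a') :: mergeL cs L.tail else c :: mergeL cs L
def blocksOf (ws : List Char) : List Char :=
  (List.range 26).flatMap (fun k => List.replicate ((lowsOf ws).count (chrL k)) (chrL k))

-- small char facts
lemma char_le_toNat {a b : Char} : a ≤ b ↔ a.toNat ≤ b.toNat := by
  rw [Char.le_def, UInt32.le_iff_toNat_le]; rfl

lemma chrL_toNat (k : Nat) (hk : k < 26) : (chrL k).toNat = 97 + k := by
  unfold chrL
  rw [Char.toNat_ofNat, if_pos]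
  exact Or.inl (by omega)

lemma alpha_lower_range (c : Char) (h : PySem.Chars.isalpha c = true) :
    97 ≤ (PySem.Chars.lowerChar c).toNat ∧ (PySem.Chars.lowerChar c).toNat ≤ 122 := by
  unfold PySem.Chars.isalpha at h
  unfold PySem.Chars.lowerChar
  by_cases hu : PySem.Chars.isupper c = true
  · rw [if_pos hu]
    unfold PySem.Chars.isupper at hu
    simp only [Bool.and_eq_true, decide_eq_true_eq, char_le_toNat] at hu
    have hA : ('A' : Char).toNat = 65 := by decide
    have hZ : ('Z' : Char).toNat = 90 := by decide
    rw [hA] at hu; rw [hZ] at hu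
    rw [Char.toNat_ofNat, if_pos (Or.inl (by omega))]
    omega
  · rw [if_neg hu]
    have hl : PySem.Chars.islower c = true := by
      rcases Bool.or_eq_true_iff.mp h with h' | h'
      · exact absurd h' hu
      · exact h'
    unfold PySem.Chars.islower at hl
    simp only [Bool.and_eq_true, decide_eq_true_eq, char_le_toNat] at hl
    have ha : ('a' : Char).toNat = 97 := by decide
    have hz : ('z' : Char).toNat = 122 := by decide
    rw [ha] at hl; rw [hz] at hl
    omega

lemma chrL_lower (c : Char) (h : PySem.Chars.isalpha c = true) :
    chrL ((PySem.Chars.lowerChar c).toNat - 97) = PySem.Chars.lowerChar c := by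
  obtain ⟨h1, h2⟩ := alpha_lower_range c h
  unfold chrL
  have he : 97 + ((PySem.Chars.lowerChar c).toNat - 97) = (PySem.Chars.lowerChar c).toNat := by omega
  rw [he, Char.ofNat_toNat]

lemma mem_lows (ws : List Char) (y : Char) (hy : y ∈ lowsOf ws) :
    97 ≤ y.toNat ∧ y.toNat ≤ 122 := by
  unfold lowsOf at hy
  simp only [List.mem_map, List.mem_filter] at hy
  obtain ⟨x, ⟨_, hx⟩, rfl⟩ := hy
  exact alpha_lower_range x hx

-- L1: the first pass of A collects the alpha positions, lowered letters and case flags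
lemma fold1_eq (ws : List Char) (s : Int) (a : List Int) (b : List Char) (c : List Bool) :
    (PySem.List.enumerate ws s).foldl
      (fun (st : List Int × List Char × List Bool) ic =>
        if PySem.Chars.isalpha ic.2 then
          (st.1 ++ [ic.1], st.2.1 ++ [PySem.Chars.lowerChar ic.2], st.2.2 ++ [PySem.Chars.isupper ic.2])
        else st)
      (a, b, c)
    = (a ++ posList ws s, b ++ lowsOf ws, c ++ upsOf ws) := by
  induction ws generalizing s a b c with
  | nil => simp [PySem.List.enumerate_nil, posList, lowsOf, upsOf]
  | cons x xs ih =>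
    rw [PySem.List.enumerate_cons, List.foldl_cons]
    by_cases hx : PySem.Chars.isalpha x = true
    · simp only [hx, if_true]
      rw [ih]
      simp [posList, lowsOf, upsOf, hx]
    · simp only [hx]
      rw [ih]
      simp [posList, lowsOf, upsOf, hx]

-- L2: the counting pass of B computes, in bucket k, the multiplicity of chrL k among the lowered letters
lemma counts_spec (ws : List Char) : ∀ (counts : List Int), counts.length = 26 →
    (ws.foldl
      (fun (counts : List Int) c =>
        if PySem.Chars.isalpha c then
          PySem.List.pySetD counts (((PySem.Chars.lowerChar c).toNat : Int) - 97)
            (PySem.List.pyGetD counts (((PySem.Chars.lowerChar c).toNat : Int) - 97) 0 + 1)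
        else counts)
      counts).length = 26 ∧
    ∀ k, k < 26 →
      (ws.foldl
        (fun (counts : List Int) c =>
          if PySem.Chars.isalpha c then
            PySem.List.pySetD counts (((PySem.Chars.lowerChar c).toNat : Int) - 97)
              (PySem.List.pyGetD counts (((PySem.Chars.lowerChar c).toNat : Int) - 97) 0 + 1)
          else counts)
        counts).getD k 0 = counts.getD k 0 + ((lowsOf ws).count (chrL k) : Int) := by
  induction ws with
  | nil =>
    intro counts h
    refine ⟨h, ?_⟩
    intro k hk
    simp [lowsOf]
  | cons c cs ih =>
    intro counts hlen
    by_cases hc : PySem.Chars.isalpha c = true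
    · obtain ⟨h97, h122⟩ := alpha_lower_range c hc
      set k₀ : Nat := (PySem.Chars.lowerChar c).toNat - 97 with hk₀def
      have hk₀ : k₀ < 26 := by omega
      have hi : ((PySem.Chars.lowerChar c).toNat : Int) - 97 = (k₀ : Int) := by omega
      simp only [List.foldl_cons, hc, if_true, hi, PySem.List.pySetD_natCast, PySem.List.pyGetD_natCast]
      set counts' := counts.set k₀ (counts.getD k₀ 0 + 1) with hcounts'
      have hlen' : counts'.length = 26 := by rw [hcounts', List.length_set, hlen]
      obtain ⟨ihl, ihv⟩ := ih counts' hlen'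
      refine ⟨ihl, ?_⟩
      intro k hk
      rw [ihv k hk]
      have hlows : lowsOf (c :: cs) = PySem.Chars.lowerChar c :: lowsOf cs := by
        simp [lowsOf, hc]
      rw [hlows, List.count_cons]
      have hget : counts'.getD k 0 = if k₀ = k then counts.getD k₀ 0 + 1 else counts.getD k 0 := by
        by_cases hkk : k₀ = k
        · rw [← hkk]
          simp [hcounts', List.getD_eq_getElem?_getD, hlen, hk₀]
        · simp [hcounts', List.getD_eq_getElem?_getD, hkk]
      rw [hget]
      have hiff : (PySem.Chars.lowerChar c == chrL k) = true ↔ k₀ = k := by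
        constructor
        · intro hbeq
          have heq : PySem.Chars.lowerChar c = chrL k := eq_of_beq hbeq
          have := congrArg Char.toNat heq
          rw [chrL_toNat k hk] at this
          omega
        · intro hkk
          rw [← hkk, hk₀def, chrL_lower c hc]
          exact beq_self_eq_true _
      by_cases hkk : k₀ = k
      · rw [if_pos hkk, if_pos (hiff.mpr hkk), hkk]
        push_cast
        ring
      · rw [if_neg hkk]
        have hfalse : (PySem.Chars.lowerChar c == chrL k) = false := by
          rw [Bool.eq_false_iff]
          intro hbe
          exact hkk (hiff.mp hbe)
        rw [hfalse]
        simp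
    · simp only [List.foldl_cons]
      rw [if_neg hc]
      obtain ⟨ihl, ihv⟩ := ih counts hlen
      refine ⟨ihl, ?_⟩
      intro k hk
      rw [ihv k hk]
      have hlows : lowsOf (c :: cs) = lowsOf cs := by simp [lowsOf, hc]
      rw [hlows]

-- L3: B's letters list is the concatenation of the 26 buckets
lemma letters_eq (ws : List Char) :
    (PySem.List.pyRange 0 26 1).foldl
      (fun (acc : List Char) k =>
        acc ++ List.replicate
          (PySem.List.pyGetD
            (ws.foldl
              (fun (counts : List Int) c =>
                if PySem.Chars.isalpha c then
                  PySem.List.pySetD counts (((PySem.Chars.lowerChar c).toNat : Int) - 97)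
                    (PySem.List.pyGetD counts (((PySem.Chars.lowerChar c).toNat : Int) - 97) 0 + 1)
                else counts)
              (List.replicate 26 0)) k 0).toNat (Char.ofNat (97 + k.toNat)))
      []
    = blocksOf ws := by
  obtain ⟨hlen, hval⟩ := counts_spec ws (List.replicate 26 0) (by simp)
  rw [PySem.List.pyRange_one, List.foldl_map, PySem.List.foldl_append_eq_flatMap, List.nil_append]
  unfold blocksOf
  rw [List.flatMap_def, List.flatMap_def]
  refine congrArg List.flatten (List.map_congr_left ?_)
  intro k hk
  rw [List.mem_range] at hk
  norm_num at hk
  simp only [zero_add, Int.toNat_natCast, PySem.List.pyGetD_natCast]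
  rw [hval k hk, List.getD_replicate _ hk, zero_add, Int.toNat_natCast]
  simp [chrL]

-- sum of a single-hit map over range
lemma sum_single_hit (n k₀ v : Nat) (h : k₀ < n) :
    ((List.range n).map (fun k => if k = k₀ then v else 0)).sum = v := by
  induction n with
  | zero => omega
  | succ m ih =>
    rw [List.range_succ, List.map_append, List.sum_append]
    by_cases hm : k₀ = m
    · have hz : ∀ k ∈ List.range m, (fun k => if k = k₀ then v else 0) k = (fun _ => 0) k := by
        intro k hk
        rw [List.mem_range] at hk
        simp only []
        rw [if_neg (by omega)]
      rw [List.map_congr_left hz]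
      simp [hm]
    · rw [ih (by omega)]
      have : ¬ m = k₀ := fun hh => hm hh.symm
      simp [this]

-- L4: the bucket concatenation is ordered
lemma blocks_pairwise (ws : List Char) : (blocksOf ws).Pairwise (· ≤ ·) := by
  unfold blocksOf
  rw [List.flatMap_def, List.pairwise_flatten]
  constructor
  · intro l hl
    simp only [List.mem_map, List.mem_range] at hl
    obtain ⟨k, _, rfl⟩ := hl
    exact List.pairwise_replicate.mpr (Or.inr le_rfl)
  · rw [List.pairwise_map, List.pairwise_iff_getElem]
    intro i j hi hj hij
    simp only [List.length_range] at hi hj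
    simp only [List.getElem_range]
    intro x hx y hy
    rw [List.eq_of_mem_replicate hx, List.eq_of_mem_replicate hy]
    rw [char_le_toNat, chrL_toNat i (by omega), chrL_toNat j (by omega)]
    omega

-- L5: it is a permutation of the lowered letters
lemma blocks_perm (ws : List Char) : (blocksOf ws).Perm (lowsOf ws) := by
  rw [List.perm_iff_count]
  intro x
  unfold blocksOf
  rw [List.count_flatMap]
  by_cases hx : 97 ≤ x.toNat ∧ x.toNat ≤ 122
  · set k₀ : Nat := x.toNat - 97 with hk₀def
    have hk₀ : k₀ < 26 := by omega
    have hx' : chrL k₀ = x := by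
      unfold chrL
      have h977 : 97 + k₀ = x.toNat := by omega
      rw [h977, Char.ofNat_toNat]
    have hcong : ∀ k ∈ List.range 26,
        (List.count x ∘ fun k => List.replicate ((lowsOf ws).count (chrL k)) (chrL k)) k
        = (fun k => if k = k₀ then (lowsOf ws).count x else 0) k := by
      intro k hk
      rw [List.mem_range] at hk
      simp only [Function.comp_apply, List.count_replicate]
      by_cases hkk : k = k₀
      · rw [if_pos hkk, if_pos (by rw [hkk, hx']; exact beq_self_eq_true x), hkk, hx']
      · rw [if_neg hkk, if_neg]
        intro hbe
        have heq : chrL k = x := eq_of_beq hbe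
        have := congrArg Char.toNat heq
        rw [chrL_toNat k hk] at this
        omega
    rw [List.map_congr_left hcong, sum_single_hit 26 k₀ _ hk₀]
  · have h0 : (lowsOf ws).count x = 0 := by
      rw [List.count_eq_zero]
      intro hmem
      exact hx (mem_lows ws x hmem)
    rw [h0]
    have hcong : ∀ k ∈ List.range 26,
        (List.count x ∘ fun k => List.replicate ((lowsOf ws).count (chrL k)) (chrL k)) k
        = (fun _ => 0) k := by
      intro k hk
      rw [List.mem_range] at hk
      simp only [Function.comp_apply, List.count_replicate]
      rw [if_neg]
      intro hbe
      have heq : chrL k = x := eq_of_beq hbe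
      have := congrArg Char.toNat heq
      rw [chrL_toNat k hk] at this
      omega
    rw [List.map_congr_left hcong]
    simp

-- L6: hence it is exactly sorted(lows)
lemma sorted_eq_blocks (ws : List Char) :
    PySem.List.sorted (lowsOf ws) (fun c => c) false = blocksOf ws :=
  PySem.List.sorted_id_eq_of_perm_of_pairwise (lowsOf ws) (blocksOf ws)
    (blocks_perm ws) (blocks_pairwise ws)

lemma set_len_append (pre : List Char) (c : Char) (cs : List Char) (v : Char) :
    (pre ++ c :: cs).set pre.length v = pre ++ v :: cs := by
  induction pre with
  | nil => rfl
  | cons a l ih => simp [ih]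

-- L7: A's index write-back is a left-to-right merge
lemma writeback_eq (ws : List Char) : ∀ (pre : List Char) (j : Int) (f : Int → Char),
    (PySem.List.enumerate (posList ws (pre.length : Int)) j).foldl
      (fun (wl : List Char) (p : Int × Int) => PySem.List.pySetD wl p.2 (f p.1)) (pre ++ ws)
    = pre ++ mergeF ws j f := by
  induction ws with
  | nil => intro pre j f; simp [posList, mergeF, PySem.List.enumerate_nil]
  | cons c cs ih =>
    intro pre j f
    by_cases hc : PySem.Chars.isalpha c = true
    · have hpos : posList (c :: cs) (pre.length : Int)
          = (pre.length : Int) :: posList cs ((pre.length : Int) + 1) := by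
        simp [posList, hc]
      rw [hpos, PySem.List.enumerate_cons]
      simp only [List.foldl_cons]
      rw [PySem.List.pySetD_natCast, set_len_append]
      have h1 : pre ++ f j :: cs = (pre ++ [f j]) ++ cs := by simp
      have h2 : (pre.length : Int) + 1 = ((pre ++ [f j]).length : Int) := by
        simp
      rw [h1, h2, ih (pre ++ [f j]) (j + 1) f]
      simp [mergeF, hc]
    · have hpos : posList (c :: cs) (pre.length : Int)
          = posList cs ((pre.length : Int) + 1) := by
        simp [posList, hc]
      have h1 : pre ++ c :: cs = (pre ++ [c]) ++ cs := by simp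
      have h2 : (pre.length : Int) + 1 = ((pre ++ [c]).length : Int) := by
        simp
      rw [hpos, h1, h2, ih (pre ++ [c]) j f]
      simp [mergeF, hc]

-- L8: with f reading the sorted letters and case flags, that merge is mergeL
lemma mergeF_eq_mergeL (ws : List Char) : ∀ (jn : Nat) (U : List Bool) (L : List Char),
    U.drop jn = upsOf ws → L.length = U.length →
    mergeF ws (jn : Int)
      (fun j => if PySem.List.pyGetD U j false
        then PySem.Chars.upperChar (PySem.List.pyGetD L j ' ')
        else PySem.List.pyGetD L j ' ')
    = mergeL ws (L.drop jn) := by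
  induction ws with
  | nil => intro jn U L h1 h2; simp [mergeF, mergeL]
  | cons c cs ih =>
    intro jn U L hU hL
    by_cases hc : PySem.Chars.isalpha c = true
    · have hups : upsOf (c :: cs) = PySem.Chars.isupper c :: upsOf cs := by
        simp [upsOf, hc]
      rw [hups] at hU
      have hjn : jn < U.length := by
        by_contra hcon
        rw [List.drop_eq_nil_of_le (by omega)] at hU
        exact List.cons_ne_nil _ _ hU.symm
      rw [List.drop_eq_getElem_cons hjn] at hU
      injection hU with hgetU hdropU
      have hjnL : jn < L.length := by omega
      simp only [mergeF, mergeL]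
      rw [if_pos hc, if_pos hc]
      have hgU : PySem.List.pyGetD U (jn : Int) false = U[jn] := by
        rw [PySem.List.pyGetD_natCast, List.getD_eq_getElem?_getD, List.getElem?_eq_getElem hjn]
        rfl
      have hgL : PySem.List.pyGetD L (jn : Int) ' ' = L[jn] := by
        rw [PySem.List.pyGetD_natCast, List.getD_eq_getElem?_getD, List.getElem?_eq_getElem hjnL]
        rfl
      have hdropL : L.drop jn = L[jn] :: L.drop (jn + 1) := List.drop_eq_getElem_cons hjnL
      rw [hdropL]
      simp only [List.headD_cons, List.tail_cons]
      rw [hgU, hgetU, hgL]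
      have hcast : (jn : Int) + 1 = ((jn + 1 : Nat) : Int) := by push_cast; ring
      rw [hcast, ih (jn + 1) U L hdropU hL]
      simp [caseApp]
    · have hups : upsOf (c :: cs) = upsOf cs := by simp [upsOf, hc]
      rw [hups] at hU
      simp only [mergeF, mergeL]
      rw [if_neg hc, if_neg hc, ih jn U L hU hL]

-- L9: B's consuming pass is mergeL
lemma walk_eq (ws : List Char) : ∀ (rem out : List Char),
    ws.countP PySem.Chars.isalpha ≤ rem.length →
    (ws.foldl
      (fun (st : List Char × List Char) c =>
        if PySem.Chars.isalpha c then
          (st.1.tail, st.2 ++ [if PySem.Chars.isupper c then PySem.Chars.upperChar (st.1.headD ' ') else st.1.headD ' '])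
        else (st.1, st.2 ++ [c]))
      (rem, out)).2 = out ++ mergeL ws rem := by
  induction ws with
  | nil => intro rem out h; simp [mergeL]
  | cons c cs ih =>
    intro rem out hlen
    rw [List.countP_cons] at hlen
    by_cases hc : PySem.Chars.isalpha c = true
    · rw [hc] at hlen
      simp only [if_true] at hlen
      cases rem with
      | nil => simp at hlen
      | cons l rem' =>
        simp only [List.foldl_cons]
        rw [if_pos hc]
        simp only [List.tail_cons, List.headD_cons]
        rw [ih rem' (out ++ [if PySem.Chars.isupper c then PySem.Chars.upperChar l else l])
          (by simp at hlen ⊢; omega)]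
        simp [mergeL, hc, caseApp]
    · simp only [List.foldl_cons]
      rw [if_neg hc]
      rw [ih rem (out ++ [c]) (by simp [hc] at hlen ⊢; omega)]
      simp [mergeL, hc]

-- the two ports agree at the list level
lemma core_eq (ws : List Char) :
    (PySem.List.enumerate (((PySem.List.enumerate ws).foldl
      (fun (st : List Int × List Char × List Bool) ic =>
        if PySem.Chars.isalpha ic.2 then
          (st.1 ++ [ic.1], st.2.1 ++ [PySem.Chars.lowerChar ic.2], st.2.2 ++ [PySem.Chars.isupper ic.2])
        else st)
      ([], [], [])).1)).foldl
      (fun (wl : List Char) (p : Int × Int) =>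
        if PySem.List.pyGetD (((PySem.List.enumerate ws).foldl
            (fun (st : List Int × List Char × List Bool) ic =>
              if PySem.Chars.isalpha ic.2 then
                (st.1 ++ [ic.1], st.2.1 ++ [PySem.Chars.lowerChar ic.2], st.2.2 ++ [PySem.Chars.isupper ic.2])
              else st)
            ([], [], [])).2.2) p.1 false then
          PySem.List.pySetD wl p.2 (PySem.Chars.upperChar (PySem.List.pyGetD
            (PySem.List.sorted (((PySem.List.enumerate ws).foldl
              (fun (st : List Int × List Char × List Bool) ic =>
                if PySem.Chars.isalpha ic.2 then
                  (st.1 ++ [ic.1], st.2.1 ++ [PySem.Chars.lowerChar ic.2], st.2.2 ++ [PySem.Chars.isupper ic.2])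
                else st)
              ([], [], [])).2.1) (fun c => c) false) p.1 ' '))
        else
          PySem.List.pySetD wl p.2 (PySem.List.pyGetD
            (PySem.List.sorted (((PySem.List.enumerate ws).foldl
              (fun (st : List Int × List Char × List Bool) ic =>
                if PySem.Chars.isalpha ic.2 then
                  (st.1 ++ [ic.1], st.2.1 ++ [PySem.Chars.lowerChar ic.2], st.2.2 ++ [PySem.Chars.isupper ic.2])
                else st)
              ([], [], [])).2.1) (fun c => c) false) p.1 ' '))
      ws
    =
    (ws.foldl
      (fun (st : List Char × List Char) c =>
        if PySem.Chars.isalpha c then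
          (st.1.tail, st.2 ++ [if PySem.Chars.isupper c then PySem.Chars.upperChar (st.1.headD ' ') else st.1.headD ' '])
        else (st.1, st.2 ++ [c]))
      ((PySem.List.pyRange 0 26 1).foldl
        (fun (acc : List Char) k =>
          acc ++ List.replicate
            (PySem.List.pyGetD
              (ws.foldl
                (fun (counts : List Int) c =>
                  if PySem.Chars.isalpha c then
                    PySem.List.pySetD counts (((PySem.Chars.lowerChar c).toNat : Int) - 97)
                      (PySem.List.pyGetD counts (((PySem.Chars.lowerChar c).toNat : Int) - 97) 0 + 1)
                  else counts)
                (List.replicate 26 0)) k 0).toNat (Char.ofNat (97 + k.toNat)))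
        [], [])).2 := by
  rw [fold1_eq ws 0 [] [] []]
  simp only [List.nil_append]
  rw [letters_eq ws]
  have hfun : (fun (wl : List Char) (p : Int × Int) =>
      if PySem.List.pyGetD (upsOf ws) p.1 false then
        PySem.List.pySetD wl p.2 (PySem.Chars.upperChar (PySem.List.pyGetD
          (PySem.List.sorted (lowsOf ws) (fun c => c) false) p.1 ' '))
      else
        PySem.List.pySetD wl p.2 (PySem.List.pyGetD
          (PySem.List.sorted (lowsOf ws) (fun c => c) false) p.1 ' '))
    = (fun (wl : List Char) (p : Int × Int) => PySem.List.pySetD wl p.2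
        ((fun j => if PySem.List.pyGetD (upsOf ws) j false
          then PySem.Chars.upperChar (PySem.List.pyGetD (PySem.List.sorted (lowsOf ws) (fun c => c) false) j ' ')
          else PySem.List.pyGetD (PySem.List.sorted (lowsOf ws) (fun c => c) false) j ' ') p.1)) := by
    funext wl p
    by_cases h : PySem.List.pyGetD (upsOf ws) p.1 false = true <;> simp [h]
  rw [hfun]
  have hwb := writeback_eq ws [] 0
    (fun j => if PySem.List.pyGetD (upsOf ws) j false
      then PySem.Chars.upperChar (PySem.List.pyGetD (PySem.List.sorted (lowsOf ws) (fun c => c) false) j ' ')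
      else PySem.List.pyGetD (PySem.List.sorted (lowsOf ws) (fun c => c) false) j ' ')
  simp only [List.length_nil, Nat.cast_zero, List.nil_append] at hwb
  rw [hwb]
  have hm := mergeF_eq_mergeL ws 0 (upsOf ws) (PySem.List.sorted (lowsOf ws) (fun c => c) false)
    (by rw [List.drop_zero])
    (by rw [PySem.List.length_sorted]; unfold lowsOf upsOf; rw [List.length_map, List.length_map])
  simp only [Nat.cast_zero, List.drop_zero] at hm
  rw [hm, sorted_eq_blocks ws]
  have hlenb : ws.countP PySem.Chars.isalpha ≤ (blocksOf ws).length := by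
    rw [(blocks_perm ws).length_eq]
    unfold lowsOf
    rw [List.length_map, List.countP_eq_length_filter]
  rw [walk_eq ws (blocksOf ws) [] hlenb, List.nil_append]

-- ===== VERDICT (by name: the statement is the Claim_ definition above) =====
theorem return_alphabetized_spec : Claim_equal_return_alphabetized := by
  intro word _
  show return_alphabetized word = return_alphabetized_alt word
  unfold return_alphabetized return_alphabetized_alt
  exact congrArg String.ofList (core_eq word.toList)
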